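-- pv_equiv track=rewrite | github.com/ebonian/compprog | examples/grader/9/Fill_In_Numbers.py | pattern6
-- ===== SOURCE A (Python) =====
-- def pattern6(N):
--     c=N
--     ans=[]
--     for i in range(N):
--         temp=[]
--         for j in range(N):
--             if j<i: temp.append(0)
--             elif i==0:
--                 if j==0:
--                     temp.append(1)
--                 elif j%2==0:
--                     temp.append(temp[j-1]+1)
--                 else:
--                     temp.append(temp[j-1]+(2*(N-j)))
--             else:
--                 if j%2==1:
--                     if i%2==1: temp.append(ans[i-1][j-1]+1)
--                     else: temp.append(ans[i-1][j-1]-1)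
--                 else:
--                     if i%2==0: temp.append(ans[i-1][j-1]+1)
--                     else: temp.append(ans[i-1][j-1]-1)
--         ans.append(temp)
--     return ans
-- ===== SOURCE B (Python) =====
-- def pattern6(N):
--     # Precompute the base row once, then fill every cell from a closed-form
--     # offset of it instead of chaining each cell off the cell above.
--     row0 = []
--     for m in range(N):
--         if m == 0:
--             row0.append(1)
--         elif m % 2 == 0:
--             row0.append(row0[-1] + 1)
--         else:
--             row0.append(row0[-1] + 2 * (N - m))
--     return [[0 if j < i else row0[j - i] + (i if (j - i) % 2 == 0 else -i)
--              for j in range(N)]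
--             for i in range(N)]
-- ===== Notes on version B (the rewrite author's own statement) =====
-- stated objective: alternative
-- what changed: B precomputes the first row once and fills each cell from the closed-form offset row0[j-i] +/- i, instead of A's per-cell chaining off the cell above (ans[i-1][j-1] +/- 1).
import Mathlib
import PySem

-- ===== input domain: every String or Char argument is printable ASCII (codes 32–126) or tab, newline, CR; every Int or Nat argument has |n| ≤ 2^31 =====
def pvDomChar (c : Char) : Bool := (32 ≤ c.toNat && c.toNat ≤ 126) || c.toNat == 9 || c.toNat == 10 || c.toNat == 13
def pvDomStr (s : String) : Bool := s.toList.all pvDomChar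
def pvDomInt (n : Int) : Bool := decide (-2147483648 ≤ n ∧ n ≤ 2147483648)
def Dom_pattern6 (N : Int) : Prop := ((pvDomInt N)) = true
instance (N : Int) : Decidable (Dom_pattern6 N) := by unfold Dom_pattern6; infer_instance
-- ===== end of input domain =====

-- B builds the base row once and fills every cell from an offset of it (row0[j-i] ± i)
-- instead of A's per-cell chaining off the cell above; return values agree on all inputs.

-- ===== PORT A =====
-- Literal port of A. 'c = N' in A is unused and dropped. Every index A reads
-- (temp[j-1], ans[i-1][j-1]) is always in range, so the pyGetD defaults never fire.
-- 'j % 2' is PySem.Int.mod (Python's %); the divisor 2 is a positive literal.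
def pattern6 (N : Int) : List (List Int) :=
  (PySem.List.pyRange 0 N 1).foldl (fun ans i =>
    ans ++ [(PySem.List.pyRange 0 N 1).foldl (fun temp j =>
      if j < i then temp ++ [0]
      else if i = 0 then
        if j = 0 then temp ++ [1]
        else if PySem.Int.mod j 2 = 0 then temp ++ [PySem.List.pyGetD temp (j - 1) 0 + 1]
        else temp ++ [PySem.List.pyGetD temp (j - 1) 0 + 2 * (N - j)]
      else
        if PySem.Int.mod j 2 = 1 then
          if PySem.Int.mod i 2 = 1 then
            temp ++ [PySem.List.pyGetD (PySem.List.pyGetD ans (i - 1) []) (j - 1) 0 + 1]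
          else
            temp ++ [PySem.List.pyGetD (PySem.List.pyGetD ans (i - 1) []) (j - 1) 0 - 1]
        else
          if PySem.Int.mod i 2 = 0 then
            temp ++ [PySem.List.pyGetD (PySem.List.pyGetD ans (i - 1) []) (j - 1) 0 + 1]
          else
            temp ++ [PySem.List.pyGetD (PySem.List.pyGetD ans (i - 1) []) (j - 1) 0 - 1]) []]) []

-- ===== PORT B =====
-- Literal port of Source B; the base-row loop (row0[-1] is pyGetD at -1) is the helper
-- 'pattern6RowZero', computed once like Source B's 'row0', then the nested comprehension.
def pattern6RowZero (N : Int) : List Int :=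
  (PySem.List.pyRange 0 N 1).foldl (fun r m =>
    if m = 0 then r ++ [1]
    else if PySem.Int.mod m 2 = 0 then r ++ [PySem.List.pyGetD r (-1) 0 + 1]
    else r ++ [PySem.List.pyGetD r (-1) 0 + 2 * (N - m)]) []

def pattern6_alt (N : Int) : List (List Int) :=
  (PySem.List.pyRange 0 N 1).map (fun i =>
    (PySem.List.pyRange 0 N 1).map (fun j =>
      if j < i then 0
      else PySem.List.pyGetD (pattern6RowZero N) (j - i) 0 +
        (if PySem.Int.mod (j - i) 2 = 0 then i else -i)))

-- ===== PRECONDITION & SPEC =====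
def Spec_pattern6 (N : Int) (out : List (List Int)) : Prop := out = pattern6_alt N
instance (N : Int) (out : List (List Int)) : Decidable (Spec_pattern6 N out) := by unfold Spec_pattern6; infer_instance

-- ===== CLAIM (what is proved, stated in full; the proofs are below) =====
def Claim_equal_pattern6 : Prop := ∀ (N : Int), Dom_pattern6 N → Spec_pattern6 N (pattern6 N)

-- ===== LEMMAS AND PROOFS =====

-- closed-form value of the base row at index m
def gRow (N : Int) : Nat → Int
  | 0 => 1
  | m + 1 => if (m + 1) % 2 = 0 then gRow N m + 1 else gRow N m + 2 * (N - (↑m + 1))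

-- closed-form cell value
def cellF (N : Int) (k t : Nat) : Int :=
  if t < k then 0 else gRow N (t - k) + (if (t - k) % 2 = 0 then (k : Int) else -(k : Int))

def rowF (N : Int) (n k : Nat) : List Int := (List.range n).map (cellF N k)

def matF (N : Int) (n : Nat) : List (List Int) := (List.range n).map (rowF N n)

lemma pyRange0 (N : Int) :
    PySem.List.pyRange 0 N 1 = List.map (Nat.cast : Nat → Int) (List.range N.toNat) := by
  by_cases h : 0 ≤ N
  · conv_lhs => rw [show N = ((N.toNat : Nat) : Int) by omega]
    exact PySem.List.pyRange_zero_natCast N.toNat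
  · rw [show N.toNat = 0 by omega, PySem.List.pyRange_one,
      show (N - 0).toNat = 0 by omega]
    rfl

lemma cellF_zero (N : Int) (t : Nat) : cellF N 0 t = gRow N t := by
  unfold cellF
  split_ifs with h1 h2
  · omega
  · simp
  · simp

lemma mod2_cast (t : Nat) : PySem.Int.mod ((t : Nat) : Int) 2 = ((t % 2 : Nat) : Int) := by
  rw [PySem.Int.mod_eq_emod_of_pos (by norm_num)]; omega

-- one step of A's chained recurrence equals the closed-form cell
lemma cell_step (N : Int) (k t : Nat) (hk : 1 ≤ k) (hkt : k ≤ t) :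
    cellF N (k - 1) (t - 1) + (if t % 2 = k % 2 then 1 else -1) = cellF N k t := by
  unfold cellF
  have h1 : ¬ t - 1 < k - 1 := by omega
  have h2 : ¬ t < k := by omega
  have h3 : t - 1 - (k - 1) = t - k := by omega
  rw [if_neg h1, if_neg h2, h3]
  have hc : ((k - 1 : Nat) : Int) = (k : Int) - 1 := by omega
  by_cases hp : (t - k) % 2 = 0
  · rw [if_pos hp, if_pos hp, if_pos (show t % 2 = k % 2 by omega), hc]; ring
  · rw [if_neg hp, if_neg hp, if_neg (show ¬ t % 2 = k % 2 by omega), hc]; ring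

-- B's base-row loop builds the closed-form row
lemma row0_loop (N : Int) (n : Nat) :
    (List.map (Nat.cast : Nat → Int) (List.range n)).foldl (fun r m =>
      if m = 0 then r ++ [1]
      else if PySem.Int.mod m 2 = 0 then r ++ [PySem.List.pyGetD r (-1) 0 + 1]
      else r ++ [PySem.List.pyGetD r (-1) 0 + 2 * (N - m)]) [] =
    (List.range n).map (gRow N) := by
  induction n with
  | zero => rfl
  | succ n ih =>
    rw [List.range_succ, List.map_append, List.foldl_append, ih, List.map_append]
    simp only [List.map_cons, List.map_nil, List.foldl_cons, List.foldl_nil]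
    cases n with
    | zero => simp [gRow]
    | succ m =>
      rw [if_neg (show ((m + 1 : Nat) : Int) ≠ 0 by omega), mod2_cast]
      have hsplit : List.map (gRow N) (List.range (m + 1)) =
          List.map (gRow N) (List.range m) ++ [gRow N m] := by
        rw [List.range_succ]; simp
      rw [hsplit, PySem.List.pyGetD_neg_one_append_singleton, ← hsplit]
      rcases Nat.mod_two_eq_zero_or_one (m + 1) with h2 | h2
      · rw [h2, if_pos (show (((0 : Nat) : Nat) : Int) = 0 by simp)]
        congr 1
        congr 1
        rw [show gRow N (m + 1) = gRow N m + 1 from by simp [gRow, h2]]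
      · rw [h2, if_neg (show ¬ (((1 : Nat) : Nat) : Int) = 0 by simp)]
        congr 1
        congr 1
        rw [show gRow N (m + 1) = gRow N m + 2 * (N - ((m : Int) + 1)) from by
          simp [gRow, h2]]
        push_cast
        ring

-- A's inner loop for row k, given the already-built rows 0..k-1, builds row k
lemma rowA_loop (N : Int) (n k t : Nat) (hkn : k < n) (ht : t ≤ n) :
    (List.map (Nat.cast : Nat → Int) (List.range t)).foldl (fun temp j =>
      if j < (k : Int) then temp ++ [0]
      else if (k : Int) = 0 then
        if j = 0 then temp ++ [1]
        else if PySem.Int.mod j 2 = 0 then temp ++ [PySem.List.pyGetD temp (j - 1) 0 + 1]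
        else temp ++ [PySem.List.pyGetD temp (j - 1) 0 + 2 * (N - j)]
      else
        if PySem.Int.mod j 2 = 1 then
          if PySem.Int.mod (k : Int) 2 = 1 then
            temp ++ [PySem.List.pyGetD (PySem.List.pyGetD (List.map (rowF N n) (List.range k)) ((k : Int) - 1) []) (j - 1) 0 + 1]
          else
            temp ++ [PySem.List.pyGetD (PySem.List.pyGetD (List.map (rowF N n) (List.range k)) ((k : Int) - 1) []) (j - 1) 0 - 1]
        else
          if PySem.Int.mod (k : Int) 2 = 0 then
            temp ++ [PySem.List.pyGetD (PySem.List.pyGetD (List.map (rowF N n) (List.range k)) ((k : Int) - 1) []) (j - 1) 0 + 1]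
          else
            temp ++ [PySem.List.pyGetD (PySem.List.pyGetD (List.map (rowF N n) (List.range k)) ((k : Int) - 1) []) (j - 1) 0 - 1]) [] =
    (List.range t).map (cellF N k) := by
  revert ht
  induction t with
  | zero => intro _; rfl
  | succ t ih =>
    intro ht
    rw [List.range_succ, List.map_append, List.foldl_append, ih (by omega), List.map_append]
    simp only [List.map_cons, List.map_nil, List.foldl_cons, List.foldl_nil]
    by_cases htk : t < k
    · rw [if_pos (by exact_mod_cast htk)]
      congr 1
      congr 1
      simp [cellF, htk]
    · rw [if_neg (by exact_mod_cast htk)]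
      by_cases hk0 : k = 0
      · subst hk0
        rw [if_pos (by simp)]
        cases t with
        | zero => simp [cellF, gRow]
        | succ m =>
          rw [if_neg (show ((m + 1 : Nat) : Int) ≠ 0 by omega), mod2_cast]
          rw [show ((m + 1 : Nat) : Int) - 1 = ((m : Nat) : Int) by omega,
            PySem.List.pyGetD_natCast,
            PySem.List.getD_map_range (cellF N 0) (m + 1) m 0 (by omega), cellF_zero]
          rcases Nat.mod_two_eq_zero_or_one (m + 1) with h2 | h2
          · rw [h2, if_pos (show (((0 : Nat) : Nat) : Int) = 0 by simp)]
            congr 1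
            congr 1
            rw [cellF_zero, show gRow N (m + 1) = gRow N m + 1 from by simp [gRow, h2]]
          · rw [h2, if_neg (show ¬ (((1 : Nat) : Nat) : Int) = 0 by simp)]
            congr 1
            congr 1
            rw [cellF_zero, show gRow N (m + 1) = gRow N m + 2 * (N - ((m : Int) + 1)) from by
              simp [gRow, h2]]
            push_cast
            ring
      · rw [if_neg (show ¬ ((k : Nat) : Int) = 0 by omega)]
        have hk1 : 1 ≤ k := by omega
        have hkt : k ≤ t := by omega
        rw [mod2_cast t, mod2_cast k,
          show ((k : Nat) : Int) - 1 = ((k - 1 : Nat) : Int) by omega,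
          show ((t : Nat) : Int) - 1 = ((t - 1 : Nat) : Int) by omega,
          ]
        simp only [PySem.List.pyGetD_natCast]
        rw [PySem.List.getD_map_range (rowF N n) k (k - 1) [] (by omega)]
        rw [show rowF N n (k - 1) = List.map (cellF N (k - 1)) (List.range n) from rfl,
          PySem.List.getD_map_range (cellF N (k - 1)) n (t - 1) 0 (by omega)]
        rcases Nat.mod_two_eq_zero_or_one t with h2t | h2t <;>
          rcases Nat.mod_two_eq_zero_or_one k with h2k | h2k
        · rw [h2t, h2k, if_neg (show ¬ (((0 : Nat) : Nat) : Int) = 1 by simp),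
            if_pos (show (((0 : Nat) : Nat) : Int) = 0 by simp)]
          congr 1
          congr 1
          rw [← cell_step N k t hk1 hkt, if_pos (by omega)]
        · rw [h2t, h2k, if_neg (show ¬ (((0 : Nat) : Nat) : Int) = 1 by simp),
            if_neg (show ¬ (((1 : Nat) : Nat) : Int) = 0 by simp)]
          congr 1
          congr 1
          rw [← cell_step N k t hk1 hkt, if_neg (by omega)]
          ring
        · rw [h2t, h2k, if_pos (show (((1 : Nat) : Nat) : Int) = 1 by simp),
            if_neg (show ¬ (((0 : Nat) : Nat) : Int) = 1 by simp)]
          congr 1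
          congr 1
          rw [← cell_step N k t hk1 hkt, if_neg (by omega)]
          ring
        · rw [h2t, h2k, if_pos (show (((1 : Nat) : Nat) : Int) = 1 by simp),
            if_pos (show (((1 : Nat) : Nat) : Int) = 1 by simp)]
          congr 1
          congr 1
          rw [← cell_step N k t hk1 hkt, if_pos (by omega)]

-- A's outer loop builds the whole closed-form matrix, row by row
lemma outerA_loop (N : Int) (n K : Nat) (hK : K ≤ n) :
    (List.map (Nat.cast : Nat → Int) (List.range K)).foldl (fun ans i =>
      ans ++ [(List.map (Nat.cast : Nat → Int) (List.range n)).foldl (fun temp j =>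
        if j < i then temp ++ [0]
        else if i = 0 then
          if j = 0 then temp ++ [1]
          else if PySem.Int.mod j 2 = 0 then temp ++ [PySem.List.pyGetD temp (j - 1) 0 + 1]
          else temp ++ [PySem.List.pyGetD temp (j - 1) 0 + 2 * (N - j)]
        else
          if PySem.Int.mod j 2 = 1 then
            if PySem.Int.mod i 2 = 1 then
              temp ++ [PySem.List.pyGetD (PySem.List.pyGetD ans (i - 1) []) (j - 1) 0 + 1]
            else
              temp ++ [PySem.List.pyGetD (PySem.List.pyGetD ans (i - 1) []) (j - 1) 0 - 1]
          else
            if PySem.Int.mod i 2 = 0 then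
              temp ++ [PySem.List.pyGetD (PySem.List.pyGetD ans (i - 1) []) (j - 1) 0 + 1]
            else
              temp ++ [PySem.List.pyGetD (PySem.List.pyGetD ans (i - 1) []) (j - 1) 0 - 1]) []]) [] =
    (List.range K).map (rowF N n) := by
  revert hK
  induction K with
  | zero => intro _; rfl
  | succ K ih =>
    intro hK
    rw [List.range_succ, List.map_append, List.foldl_append, ih (by omega), List.map_append]
    simp only [List.map_cons, List.map_nil, List.foldl_cons, List.foldl_nil]
    congr 1
    congr 1
    rw [rowA_loop N n K n (by omega) le_rfl]
    rfl

lemma A_eq (N : Int) : pattern6 N = matF N N.toNat := by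
  unfold pattern6
  rw [pyRange0]
  exact outerA_loop N N.toNat N.toNat le_rfl

lemma B_eq (N : Int) : pattern6_alt N = matF N N.toNat := by
  unfold pattern6_alt pattern6RowZero
  rw [pyRange0, row0_loop]
  unfold matF
  rw [List.map_map]
  apply List.map_congr_left
  intro k hk
  simp only [Function.comp_apply]
  unfold rowF
  rw [List.map_map]
  apply List.map_congr_left
  intro t htm
  simp only [Function.comp_apply]
  have htn : t < N.toNat := List.mem_range.mp htm
  by_cases htk : t < k
  · rw [if_pos (by exact_mod_cast htk)]
    simp [cellF, htk]
  · rw [if_neg (by exact_mod_cast htk)]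
    rw [show ((t : Nat) : Int) - ((k : Nat) : Int) = ((t - k : Nat) : Int) by omega,
      PySem.List.pyGetD_natCast,
      PySem.List.getD_map_range (gRow N) N.toNat (t - k) 0 (by omega), mod2_cast]
    unfold cellF
    rw [if_neg htk]
    rcases Nat.mod_two_eq_zero_or_one (t - k) with h2 | h2
    · rw [h2, if_pos (show (((0 : Nat) : Nat) : Int) = 0 by simp), if_pos rfl]
    · rw [h2, if_neg (show ¬ (((1 : Nat) : Nat) : Int) = 0 by simp), if_neg (by omega)]

-- ===== VERDICT (by name: the statement is the Claim_ definition above) =====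
theorem pattern6_spec : Claim_equal_pattern6 := by
  intro N _
  show pattern6 N = pattern6_alt N
  rw [A_eq, B_eq]
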